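-- pv_equiv track=rewrite | github.com/19SpringDifferentialPrivacy/Evaluation | order_two_dimension/frequency.py | getC
-- ===== SOURCE A (Python) =====
-- def getC(D, keys):
--     # 对keys中的每一个key进行计数
--     C = []
--     for key in keys:
--         c = 0
--         for T in D:
--             have = True
--             for k in key:
--                 if k not in T:
--                     have = False
--             if have:
--                 c += 1
--         C.append(c)
--     return C
-- ===== SOURCE B (Python) =====
-- def getC(D, keys):
--     # Inverted index: element -> set of indices of transactions containing it;
--     # each key's count is the size of the intersection of its posting sets.
--     inv = {}
--     for i, T in enumerate(D):
--         for x in T: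
--             inv.setdefault(x, set()).add(i)
--     universe = set(range(len(D)))
--     C = []
--     for key in keys:
--         s = universe
--         for k in key:
--             s = s & inv.get(k, set())
--         C.append(len(s))
--     return C
-- ===== Notes on version B (the rewrite author's own statement) =====
-- stated objective: faster
-- what changed: Builds an inverted index (element -> set of transaction indices) in one pass over D, then counts each key by intersecting its elements' posting sets, instead of scanning every transaction list for every element of every key.
import Mathlib
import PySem

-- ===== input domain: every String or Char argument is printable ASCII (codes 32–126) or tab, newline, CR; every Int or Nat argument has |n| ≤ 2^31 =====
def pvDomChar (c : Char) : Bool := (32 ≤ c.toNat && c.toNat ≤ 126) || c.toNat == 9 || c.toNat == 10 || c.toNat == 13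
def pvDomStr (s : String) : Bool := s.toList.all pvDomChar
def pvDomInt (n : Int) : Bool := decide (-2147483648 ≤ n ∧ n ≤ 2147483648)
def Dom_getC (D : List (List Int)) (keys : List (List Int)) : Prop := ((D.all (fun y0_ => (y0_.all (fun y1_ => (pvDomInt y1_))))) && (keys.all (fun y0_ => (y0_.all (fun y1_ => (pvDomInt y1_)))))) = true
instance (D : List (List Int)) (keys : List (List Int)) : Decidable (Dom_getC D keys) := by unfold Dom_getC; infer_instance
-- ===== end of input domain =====

-- B builds an inverted index (element -> set of transaction indices) once and counts each key
-- by intersecting its elements' posting sets (objective: faster).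


-- ===== PORT A =====
def getC (D : List (List Int)) (keys : List (List Int)) : List Int :=
  keys.foldl (fun C key =>
    let c : Int := D.foldl (fun c T =>
      let haveAll := key.foldl (fun h k => if ¬ T.contains k then false else h) true
      if haveAll then c + 1 else c) 0
    C ++ [c]) []

-- ===== PORT B =====
-- inv = {}; for i, T in enumerate(D): for x in T: inv.setdefault(x, set()).add(i)
def pvInv (D : List (List Int)) : PySem.Dict Int (PySem.Set Int) :=
  (PySem.List.enumerate D).foldl (fun inv p =>
    p.2.foldl (fun inv x =>
      inv.modify x PySem.Set.empty (fun s => PySem.Set.add s p.1)) inv) PySem.Dict.empty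

def getC_alt (D : List (List Int)) (keys : List (List Int)) : List Int :=
  let inv := pvInv D
  let univ : PySem.Set Int := PySem.Set.ofList (PySem.List.pyRange 0 (D.length : Int) 1)
  keys.foldl (fun C key =>
    let s := key.foldl (fun s k => PySem.Set.inter s (inv.getD k PySem.Set.empty)) univ
    C ++ [PySem.Set.len s]) []

-- ===== PRECONDITION & SPEC =====
def Spec_getC (D : List (List Int)) (keys : List (List Int)) (out : List Int) : Prop := out = getC_alt D keys
instance (D : List (List Int)) (keys : List (List Int)) (out : List Int) : Decidable (Spec_getC D keys out) := by unfold Spec_getC; infer_instance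

-- ===== CLAIM (what is proved, stated in full; the proofs are below) =====
def Claim_equal_getC : Prop := ∀ (D : List (List Int)) (keys : List (List Int)), Dom_getC D keys → Spec_getC D keys (getC D keys)

-- ===== LEMMAS AND PROOFS =====

-- A's innermost loop over key is an all-check
theorem pv_fold_all (T key : List Int) (b : Bool) :
    key.foldl (fun h k => if ¬ T.contains k then false else h) b
      = (b && key.all T.contains) := by
  induction key generalizing b with
  | nil => simp
  | cons k ks ih =>
    simp only [List.foldl_cons, List.all_cons, ih]
    cases b <;> by_cases hk : k ∈ T <;> simp [hk]

-- A's middle counting loop is countP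
theorem pv_fold_count (p : List Int → Bool) (D : List (List Int)) (c : Int) :
    D.foldl (fun c T => if p T then c + 1 else c) c = c + (D.countP p : Int) := by
  induction D generalizing c with
  | nil => simp
  | cons T Ds ih =>
    by_cases h : p T <;> simp [h, ih] <;> omega

-- an appending foldl builds a map
theorem pv_fold_map (g : List Int → Int) (keys : List (List Int)) (acc : List Int) :
    keys.foldl (fun C key => C ++ [g key]) acc = acc ++ keys.map g := by
  induction keys generalizing acc with
  | nil => simp
  | cons k ks ih => simp [ih]

-- membership in a posting set after the inner index-building loop over one transaction
theorem pv_inner_mem (T : List Int) (j : Int) (d : PySem.Dict Int (PySem.Set Int)) (k i : Int) :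
    (i ∈ (T.foldl (fun d x => d.modify x PySem.Set.empty (fun s => PySem.Set.add s j)) d).getD k PySem.Set.empty)
      ↔ i ∈ d.getD k PySem.Set.empty ∨ (k ∈ T ∧ i = j) := by
  induction T generalizing d with
  | nil => simp
  | cons x xs ih =>
    rw [List.foldl_cons, ih, PySem.Dict.getD_modify]
    by_cases hk : k = x
    · simp only [hk, List.mem_cons, true_or, true_and]
      simp only [if_true, PySem.Set.mem_add]
      tauto
    · rw [if_neg hk]
      simp only [List.mem_cons]
      tauto

-- membership in a posting set of the full inverted index built from enumerated pairs
theorem pv_build_mem (pairs : List (Int × List Int)) (d : PySem.Dict Int (PySem.Set Int)) (k i : Int) :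
    (i ∈ (pairs.foldl (fun d p =>
        p.2.foldl (fun d x => d.modify x PySem.Set.empty (fun s => PySem.Set.add s p.1)) d) d).getD k PySem.Set.empty)
      ↔ i ∈ d.getD k PySem.Set.empty ∨ ∃ p ∈ pairs, k ∈ p.2 ∧ i = p.1 := by
  induction pairs generalizing d with
  | nil => simp
  | cons p ps ih =>
    simp only [List.foldl_cons, ih, pv_inner_mem, List.mem_cons]
    constructor
    · rintro ((h | h) | ⟨q, hq, h⟩)
      · exact Or.inl h
      · exact Or.inr ⟨p, Or.inl rfl, h⟩
      · exact Or.inr ⟨q, Or.inr hq, h⟩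
    · rintro (h | ⟨q, (rfl | hq), h⟩)
      · exact Or.inl (Or.inl h)
      · exact Or.inl (Or.inr h)
      · exact Or.inr ⟨q, hq, h⟩

-- posting-set membership for the inverted index of D
theorem pv_inv_mem (D : List (List Int)) (k i : Int) :
    (i ∈ (pvInv D).getD k PySem.Set.empty)
      ↔ ∃ (m : Nat) (h : m < D.length), i = (m : Int) ∧ k ∈ D[m] := by
  unfold pvInv
  rw [pv_build_mem]
  simp only [PySem.Dict.getD_empty]
  constructor
  · rintro (h | ⟨p, hp, hk, rfl⟩)
    · simp [PySem.Set.empty] at h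
    · obtain ⟨m, hm, rfl⟩ := (PySem.List.mem_enumerate_iff D 0 p).mp hp
      exact ⟨m, hm, by simpa using hk⟩
  · rintro ⟨m, hm, rfl, hk⟩
    refine Or.inr ⟨((m : Int), D[m]), ?_, hk, rfl⟩
    exact (PySem.List.mem_enumerate_iff D 0 _).mpr ⟨m, hm, by simp⟩

-- B's intersection loop is one filter over the start list
theorem pv_inter_fold (inv : PySem.Dict Int (PySem.Set Int)) (key : List Int) (s : List Int) :
    key.foldl (fun s k => PySem.Set.inter s (inv.getD k PySem.Set.empty)) s
      = s.filter (fun i => key.all (fun k => (inv.getD k PySem.Set.empty).contains i)) := by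
  induction key generalizing s with
  | nil => simp
  | cons k ks ih =>
    rw [List.foldl_cons, ih]
    show List.filter _ (List.filter _ s) = _
    rw [List.filter_filter]
    apply List.filter_congr
    intro i _
    simp [Bool.and_comm]

-- counting over indices equals counting over the list
theorem pv_countP_range (l : List (List Int)) (q : Nat → Bool) (p : List Int → Bool)
    (h : ∀ (m : Nat) (hm : m < l.length), q m = p l[m]) :
    (List.range l.length).countP q = l.countP p := by
  induction l using List.reverseRecOn with
  | nil => simp
  | append_singleton xs x ih =>
    rw [List.length_append, List.length_singleton, List.range_succ, List.countP_append,
        List.countP_append, ih]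
    · have hx := h xs.length (by simp)
      simp at hx
      simp [hx, List.countP_cons]
    · intro m hm
      have := h m (by simp; omega)
      rwa [List.getElem_append_left hm] at this

-- per-key: B's intersection length equals A's count
theorem pv_key_count (D : List (List Int)) (key : List Int) :
    PySem.Set.len (key.foldl (fun s k => PySem.Set.inter s ((pvInv D).getD k PySem.Set.empty))
        (PySem.Set.ofList (PySem.List.pyRange 0 (D.length : Int) 1)))
      = (D.countP (fun T => key.all T.contains) : Int) := by
  rw [pv_inter_fold,
      PySem.Set.ofList_eq_self_of_nodup _ (PySem.List.nodup_pyRange_one 0 (D.length : Int))]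
  unfold PySem.Set.len
  rw [PySem.List.pyRange_one, List.filter_map, List.length_map,
      ← List.countP_eq_length_filter]
  have hn : (((D.length : Int)) - 0).toNat = D.length := by simp
  rw [hn]
  congr 1
  apply pv_countP_range
  intro m hm
  have hmem : ∀ k : Int, ((pvInv D).getD k PySem.Set.empty).contains ((0 : Int) + (m : Int))
      = decide (k ∈ D[m]) := by
    intro k
    have hiff : ((pvInv D).getD k PySem.Set.empty).contains ((0 : Int) + (m : Int)) = true
        ↔ k ∈ D[m] := by
      rw [PySem.Set.contains_iff, pv_inv_mem]
      constructor
      · rintro ⟨m', hm', heq, hd⟩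
        have hmm : m = m' := by omega
        subst hmm; exact hd
      · intro hd; exact ⟨m, hm, by simp, hd⟩
    apply Bool.eq_iff_iff.mpr
    simp only [decide_eq_true_eq]
    exact hiff
  simp only [Function.comp, hmem]
  apply Bool.eq_iff_iff.mpr
  simp

-- ===== VERDICT (by name: the statement is the Claim_ definition above) =====
theorem getC_spec : Claim_equal_getC := by
  intro D keys _
  unfold Spec_getC getC getC_alt
  simp only [pv_fold_all, Bool.true_and, pv_fold_count, zero_add]
  have hA : keys.foldl (fun C key => C ++ [(D.countP (fun T => key.all T.contains) : Int)]) []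
      = keys.map (fun key => (D.countP (fun T => key.all T.contains) : Int)) := by
    rw [pv_fold_map]; simp
  have hB : keys.foldl (fun C key =>
        C ++ [PySem.Set.len (key.foldl (fun s k => PySem.Set.inter s ((pvInv D).getD k PySem.Set.empty))
          (PySem.Set.ofList (PySem.List.pyRange 0 (D.length : Int) 1)))]) []
      = keys.map (fun key => PySem.Set.len (key.foldl (fun s k => PySem.Set.inter s ((pvInv D).getD k PySem.Set.empty))
          (PySem.Set.ofList (PySem.List.pyRange 0 (D.length : Int) 1)))) := by
    rw [pv_fold_map]; simp
  rw [hA, hB]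
  apply List.map_congr_left
  intro key _
  exact (pv_key_count D key).symm
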